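-- pv_equiv track=rewrite | github.com/miguelamica/informatica-gral | practica parcial 2 act 10 p1.py | esMonolavica
-- ===== SOURCE A (Python) =====
-- def esVocal(c):
--     return c in "aeiou"
--
-- def esMonolavica(pal):
--     i=0
--     x=0
--     vocal=""
--     while i<len(pal):
--         if esVocal(pal[i])==True:
--             vocal=vocal+pal[i]
--             i+=1
--         else:
--             i+=1
--     res=True
--     if len(vocal)==1:
--         res=True
--     elif vocal=="":
--         res=False
--     else:
--         while (x<len(vocal)-1):
--             if vocal[x]==vocal[x+1]:
--                 x+=1
--             else:
--                 res=False
--                 x=len(vocal)-1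
--     return res
-- ===== SOURCE B (Python) =====
-- def esMonolavica(pal):
--     vs = {c for c in pal if c in "aeiou"}
--     return len(vs) == 1
-- ===== Notes on version B (the rewrite author's own statement) =====
-- stated objective: simpler
-- what changed: Replaces A's extract-vowels loop (built by repeated string concatenation) plus adjacent-equality scan and branch cascade with a set comprehension collecting the distinct vowels and a single cardinality test len(vs) == 1.
import Mathlib
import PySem

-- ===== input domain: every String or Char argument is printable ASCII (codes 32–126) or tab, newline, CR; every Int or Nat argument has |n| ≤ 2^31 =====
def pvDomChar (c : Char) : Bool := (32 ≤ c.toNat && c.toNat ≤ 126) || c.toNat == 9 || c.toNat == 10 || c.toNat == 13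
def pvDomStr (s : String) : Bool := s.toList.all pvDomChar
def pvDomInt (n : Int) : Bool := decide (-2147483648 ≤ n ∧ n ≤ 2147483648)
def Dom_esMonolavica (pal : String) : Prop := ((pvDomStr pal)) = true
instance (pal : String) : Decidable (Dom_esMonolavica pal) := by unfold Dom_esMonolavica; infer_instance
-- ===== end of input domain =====

-- B replaces A's extract-then-adjacent-compare loops by a set of the distinct vowels plus a cardinality test (objective: simpler).

-- ===== PORT A =====
-- helper esVocal: c in "aeiou"
def esVocal (c : Char) : Bool := "aeiou".toList.contains c

-- first while loop: walk pal by index, appending vowels to vocal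
def pvLoopVocal : List Char → List Char → List Char
  | [], vocal => vocal
  | c :: rest, vocal =>
      if esVocal c = true then pvLoopVocal rest (vocal ++ [c])
      else pvLoopVocal rest vocal

-- second while loop: compare vocal[x] with vocal[x+1]; on mismatch res=False and jump past the end
def pvLoopAdj : List Char → Bool
  | a :: b :: rest => if a == b then pvLoopAdj (b :: rest) else false
  | _ => true

def esMonolavica (pal : String) : Bool :=
  let vocal := pvLoopVocal pal.toList []
  if vocal.length == 1 then true
  else if vocal == [] then false
  else pvLoopAdj vocal

-- ===== PORT B =====
def esMonolavica_alt (pal : String) : Bool :=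
  let vs : PySem.Set Char := PySem.Set.ofList (pal.toList.filter (fun c => "aeiou".toList.contains c))
  vs.length == 1

-- ===== PRECONDITION & SPEC =====
def Spec_esMonolavica (pal : String) (out : Bool) : Prop := out = esMonolavica_alt pal
instance (pal : String) (out : Bool) : Decidable (Spec_esMonolavica pal out) := by unfold Spec_esMonolavica; infer_instance

-- ===== CLAIM (what is proved, stated in full; the proofs are below) =====
def Claim_equal_esMonolavica : Prop := ∀ (pal : String), Dom_esMonolavica pal → Spec_esMonolavica pal (esMonolavica pal)

-- ===== LEMMAS AND PROOFS =====

theorem pvLoopVocal_eq_filter (l acc : List Char) :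
    pvLoopVocal l acc = acc ++ l.filter esVocal := by
  induction l generalizing acc with
  | nil => simp [pvLoopVocal]
  | cons c rest ih =>
      by_cases h : esVocal c = true
      · simp [pvLoopVocal, h, ih]
      · simp [pvLoopVocal, h, ih, List.filter_cons]

theorem pvLoopAdj_eq_all (a : Char) (l : List Char) :
    pvLoopAdj (a :: l) = l.all (fun x => a == x) := by
  induction l generalizing a with
  | nil => simp [pvLoopAdj]
  | cons b rest ih =>
      by_cases h : a = b
      · subst h; simp [pvLoopAdj, ih]
      · simp [pvLoopAdj, h, List.all_cons]

theorem ofList_cons_of_all (a : Char) (l : List Char)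
    (h : l.all (fun x => a == x) = true) : PySem.Set.ofList (a :: l) = [a] := by
  have : ∀ m : List Char, m.all (fun x => a == x) = true →
      m.foldl PySem.Set.add [a] = [a] := by
    intro m hm
    induction m with
    | nil => rfl
    | cons b rest ih =>
        simp only [List.all_cons, Bool.and_eq_true, beq_iff_eq] at hm
        obtain ⟨hb, hrest⟩ := hm
        subst hb
        simpa [List.foldl_cons, PySem.Set.add] using ih hrest
  simpa [PySem.Set.ofList_eq_foldl, List.foldl_cons, PySem.Set.add,
    PySem.Set.empty] using this l h

theorem two_le_ofList_cons (a : Char) (l : List Char)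
    (h : l.all (fun x => a == x) = false) :
    2 ≤ (PySem.Set.ofList (a :: l)).length := by
  rw [List.all_eq_false] at h
  obtain ⟨b, hb, hab⟩ := h
  simp only [beq_iff_eq, Bool.not_eq_true, decide_eq_false_iff_not] at hab
  have hab' : a ≠ b := by
    intro hEq; exact hab (by simpa [hEq] using rfl)
  have ha : a ∈ PySem.Set.ofList (a :: l) := by
    rw [PySem.Set.mem_ofList]; exact List.mem_cons_self ..
  have hbmem : b ∈ PySem.Set.ofList (a :: l) := by
    rw [PySem.Set.mem_ofList]; exact List.mem_cons_of_mem _ hb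
  by_contra hlen
  push_neg at hlen
  interval_cases hs : (PySem.Set.ofList (a :: l)).length
  · simp [List.length_eq_zero_iff] at hs; simp [hs] at ha
  · obtain ⟨x, hx⟩ := List.length_eq_one_iff.mp hs
    rw [hx] at ha hbmem
    simp at ha hbmem
    exact hab' (ha.trans hbmem.symm)

theorem esMonolavica_eq (pal : String) : esMonolavica pal = esMonolavica_alt pal := by
  unfold esMonolavica esMonolavica_alt
  have hfil : pal.toList.filter (fun c => "aeiou".toList.contains c)
      = pal.toList.filter esVocal := rfl
  rw [hfil, pvLoopVocal_eq_filter, List.nil_append]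
  cases hv : pal.toList.filter esVocal with
  | nil => decide
  | cons a l =>
      cases l with
      | nil => simp [ofList_cons_of_all a [] (by simp)]
      | cons b rest =>
          simp only [List.length_cons, beq_iff_eq]
          have hne : ¬ (rest.length + 1 + 1 = 1) := by omega
          simp only [if_neg hne, reduceCtorEq, if_neg (by simp : ¬(a :: b :: rest = []))]
          rw [pvLoopAdj_eq_all]
          by_cases hall : (b :: rest).all (fun x => a == x) = true
          · rw [hall, ofList_cons_of_all a (b :: rest) hall]
            simp
          · have hall' : (b :: rest).all (fun x => a == x) = false := by
              simpa using hall
            rw [hall']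
            have := two_le_ofList_cons a (b :: rest) hall'
            have : (PySem.Set.ofList (a :: b :: rest)).length ≠ 1 := by omega
            simp [this]

-- ===== VERDICT (by name: the statement is the Claim_ definition above) =====
theorem esMonolavica_spec : Claim_equal_esMonolavica := by
  intro pal _
  unfold Spec_esMonolavica
  exact esMonolavica_eq pal
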